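-- pv_equiv track=rewrite | github.com/OzkanOzsahin/python-for | main.py | alphabet_set
-- ===== SOURCE A (Python) =====
-- def alphabet_set(countries):
--     countries = [country.lower() for country in countries]
--
--     letters_needed = list("abcdefghijklmnopqrstuvwxyz")
--     countries_used = []
--     for country in countries:
--         for char in country:
--             if char in letters_needed:
--                 letters_needed.remove(char)
--                 if country not in countries_used:
--                     countries_used.append(country)
--                 if len(letters_needed) == 0:
--                     return countries_used
-- ===== SOURCE B (Python) =====
-- ALPHABET = set("abcdefghijklmnopqrstuvwxyz")
--
-- def alphabet_set(countries):
--     lows = [c.lower() for c in countries]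
--     # pass 1: prefix coverage; covers[i] = letters occurring in lows[:i]
--     covers = [set()]
--     for c in lows:
--         covers.append(covers[-1] | (set(c) & ALPHABET))
--     # pass 2: first index whose prefix covers the whole alphabet
--     stop = None
--     for i in range(len(lows)):
--         if covers[i + 1] >= ALPHABET:
--             stop = i
--             break
--     if stop is None:
--         return None
--     # pass 3: keep exactly the countries that contribute a new letter
--     return [c for i, c in enumerate(lows[:stop + 1])
--             if (set(c) & ALPHABET) - covers[i]]
-- ===== Notes on version B (the rewrite author's own statement) =====
-- stated objective: alternative
-- what changed: B replaces A's online greedy loop (mutable needed-letters list, per-character membership/remove, early return mid-scan) by three staged passes: build the list of prefix letter-coverage sets, find the first index whose prefix covers the alphabet, then filter the lowered countries up to that index by whether they add a new letter; no mutable needed set and no early exit from a scan.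
import Mathlib
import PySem

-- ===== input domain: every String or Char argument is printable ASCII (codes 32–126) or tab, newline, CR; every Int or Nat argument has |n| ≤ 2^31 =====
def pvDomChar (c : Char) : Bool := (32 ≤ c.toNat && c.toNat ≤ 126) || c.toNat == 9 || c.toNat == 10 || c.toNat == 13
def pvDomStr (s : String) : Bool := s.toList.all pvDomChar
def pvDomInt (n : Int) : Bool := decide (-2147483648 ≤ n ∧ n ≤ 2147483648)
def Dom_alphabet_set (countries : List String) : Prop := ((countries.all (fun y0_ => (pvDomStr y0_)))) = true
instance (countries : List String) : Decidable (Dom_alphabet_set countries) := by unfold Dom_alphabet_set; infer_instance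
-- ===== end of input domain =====

-- B recomputes the same answer in three staged passes (prefix-coverage sets, first covering
-- index, then a filter) instead of A's online greedy loop with a mutable needed list
-- (objective: alternative decomposition, same results).

-- ===== PORT A =====
-- inner 'for char in country' loop; .error = A's early 'return countries_used'
def alphabetInnerA (country : String) : List Char → List Char → List String →
    Except (List String) (List Char × List String)
  | [], needed, used => .ok (needed, used)
  | c :: cs, needed, used =>
    if c ∈ needed then
      -- letters_needed.remove(char): char is present (guarded), so it is List.erase (first occurrence)
      let needed' := needed.erase c
      let used' := if country ∈ used then used else used ++ [country]
      if needed'.length = 0 then .error used'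
      else alphabetInnerA country cs needed' used'
    else alphabetInnerA country cs needed used

-- outer 'for country in countries' loop; falls off the end → Python's implicit None
def alphabetOuterA : List String → List Char → List String → Option (List String)
  | [], _, _ => none
  | c :: rest, needed, used =>
    match alphabetInnerA c c.toList needed used with
    | .error r => some r
    | .ok (n, u) => alphabetOuterA rest n u

def alphabet_set (countries : List String) : Option (List String) :=
  alphabetOuterA (countries.map PySem.Str.lower) ("abcdefghijklmnopqrstuvwxyz".toList) []

-- ===== PORT B =====
def pvAlphaList : List Char := "abcdefghijklmnopqrstuvwxyz".toList
def pvAlphaSet : PySem.Set Char := PySem.Set.ofList pvAlphaList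

-- pass 1: covers[-1] | (set(c) & ALPHABET) appended for each country; carrying cur = covers[-1]
def coversB : List String → PySem.Set Char → List (PySem.Set Char)
  | [], _ => []
  | c :: rest, cur =>
    let nxt := PySem.Set.union cur (PySem.Set.inter (PySem.Set.ofList c.toList) pvAlphaSet)
    nxt :: coversB rest nxt

-- pass 2: first i with covers[i+1] >= ALPHABET (scans the covers list from index 0)
def findStopB : List (PySem.Set Char) → Nat → Option Nat
  | [], _ => none
  | s :: rest, i =>
    if pvAlphaList.all (fun ch => decide (ch ∈ s)) then some i else findStopB rest (i + 1)

-- pass 3: the comprehension, zipping lows[:stop+1] with covers[i]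
def pickB : List String → List (PySem.Set Char) → List String
  | c :: rest, s :: ss =>
    if PySem.Set.diff (PySem.Set.inter (PySem.Set.ofList c.toList) pvAlphaSet) s ≠ [] then
      c :: pickB rest ss
    else pickB rest ss
  | _, _ => []

def alphabet_set_alt (countries : List String) : Option (List String) :=
  let lows := countries.map PySem.Str.lower
  let covers := coversB lows []
  match findStopB covers 0 with
  | none => none
  | some stop => some (pickB (lows.take (stop + 1)) (([] : PySem.Set Char) :: covers))

-- ===== PRECONDITION & SPEC =====
def Spec_alphabet_set (countries : List String) (out : Option (List String)) : Prop := out = alphabet_set_alt countries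
instance (countries : List String) (out : Option (List String)) : Decidable (Spec_alphabet_set countries out) := by unfold Spec_alphabet_set; infer_instance

-- ===== CLAIM (what is proved, stated in full; the proofs are below) =====
def Claim_equal_alphabet_set : Prop := ∀ (countries : List String), Dom_alphabet_set countries → Spec_alphabet_set countries (alphabet_set countries)

-- ===== LEMMAS AND PROOFS =====

-- proof-side intermediate: the online greedy loop over sets (bridge between A and B)
def alphabetGreedy : List String → PySem.Set Char → List String → Option (List String)
  | [], _, _ => none
  | c :: rest, needed, used =>
    let low := PySem.Str.lower c
    let new := PySem.Set.inter (PySem.Set.ofList low.toList) needed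
    if new ≠ [] then
      let used' := used ++ [low]
      let needed' := PySem.Set.diff needed new
      if needed' = [] then some used' else alphabetGreedy rest needed' used'
    else alphabetGreedy rest needed used

theorem mem_pvAlphaSet (x : Char) : x ∈ pvAlphaSet ↔ x ∈ pvAlphaList := by
  unfold pvAlphaSet; exact PySem.Set.mem_ofList _ _

theorem foldl_erase_nil (cs : List Char) :
    cs.foldl (fun (n : List Char) c => n.erase c) [] = [] := by
  induction cs with
  | nil => rfl
  | cons c cs ih => simpa using ih

theorem foldl_erase_of_disjoint (neededA : List Char) (cs : List Char)
    (h : ∀ c ∈ cs, c ∉ neededA) :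
    cs.foldl (fun (n : List Char) c => n.erase c) neededA = neededA := by
  induction cs with
  | nil => rfl
  | cons a as iha =>
    simp only [List.foldl_cons, List.erase_of_not_mem (h a (by simp))]
    exact iha (fun c hc => h c (by simp [hc]))

theorem mem_foldl_erase (cs : List Char) :
    ∀ (needed : List Char), needed.Nodup → ∀ x,
      (x ∈ cs.foldl (fun (n : List Char) c => n.erase c) needed ↔ x ∈ needed ∧ x ∉ cs) := by
  induction cs with
  | nil => intro needed _ x; simp
  | cons c cs ih =>
    intro needed hnd x
    simp only [List.foldl_cons]
    rw [ih _ (hnd.erase c) x, hnd.mem_erase_iff]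
    simp only [List.mem_cons]
    tauto

theorem nodup_foldl_erase (cs : List Char) :
    ∀ (needed : List Char), needed.Nodup →
      (cs.foldl (fun (n : List Char) c => n.erase c) needed).Nodup := by
  induction cs with
  | nil => intro needed h; exact h
  | cons c cs ih => intro needed h; exact ih _ (h.erase c)

-- A's inner loop when the country is already in used: nothing is appended
theorem innerA_mem (country : String) (cs : List Char) :
    ∀ (needed : List Char) (used : List String), needed ≠ [] → country ∈ used →
      alphabetInnerA country cs needed used =
        (if cs.foldl (fun (n : List Char) c => n.erase c) needed = []
         then .error used
         else .ok (cs.foldl (fun (n : List Char) c => n.erase c) needed, used)) := by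
  induction cs with
  | nil => intro needed used hne _; simp [alphabetInnerA, hne]
  | cons c cs ih =>
    intro needed used hne hmem
    simp only [alphabetInnerA, List.foldl_cons]
    by_cases hc : c ∈ needed
    · rw [if_pos hc, if_pos hmem]
      by_cases h0 : needed.erase c = []
      · rw [if_pos (by rw [h0]; rfl), h0, foldl_erase_nil, if_pos rfl]
      · rw [if_neg (fun h => h0 (List.length_eq_zero_iff.mp h))]
        exact ih _ _ h0 hmem
    · rw [if_neg hc, List.erase_of_not_mem hc]
      exact ih _ _ hne hmem

-- A's inner loop when the country is not yet in used
theorem innerA_not_mem (country : String) (cs : List Char) :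
    ∀ (needed : List Char) (used : List String), needed ≠ [] → country ∉ used →
      alphabetInnerA country cs needed used =
        (if cs.foldl (fun (n : List Char) c => n.erase c) needed = []
         then .error (used ++ [country])
         else .ok (cs.foldl (fun (n : List Char) c => n.erase c) needed,
                   if ∃ x ∈ cs, x ∈ needed then used ++ [country] else used)) := by
  induction cs with
  | nil => intro needed used hne _; simp [alphabetInnerA, hne]
  | cons c cs ih =>
    intro needed used hne hmem
    simp only [alphabetInnerA, List.foldl_cons]
    by_cases hc : c ∈ needed
    · rw [if_pos hc, if_neg hmem,
          if_pos (show ∃ x ∈ c :: cs, x ∈ needed from ⟨c, by simp, hc⟩)]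
      by_cases h0 : needed.erase c = []
      · rw [if_pos (by rw [h0]; rfl), h0, foldl_erase_nil, if_pos rfl]
      · rw [if_neg (fun h => h0 (List.length_eq_zero_iff.mp h)),
            innerA_mem country cs _ _ h0 (by simp)]
    · rw [if_neg hc, List.erase_of_not_mem hc, ih _ _ hne hmem]
      have hiff : (∃ x ∈ cs, x ∈ needed) ↔ (∃ x ∈ c :: cs, x ∈ needed) := by
        constructor
        · rintro ⟨x, hx1, hx2⟩; exact ⟨x, by simp [hx1], hx2⟩
        · rintro ⟨x, hx1, hx2⟩
          rcases List.mem_cons.mp hx1 with rfl | hx1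
          · exact absurd hx2 hc
          · exact ⟨x, hx1, hx2⟩
      by_cases h0 : cs.foldl (fun (n : List Char) c => n.erase c) needed = []
      · rw [if_pos h0, if_pos h0]
      · rw [if_neg h0, if_neg h0, if_congr hiff rfl rfl]

-- A's outer loop = the greedy set loop (invariant-carrying induction)
theorem outer_eq (countries : List String) :
    ∀ (neededA : List Char) (neededB : PySem.Set Char) (used : List String),
      neededA.Nodup →
      (∀ x, x ∈ neededA ↔ x ∈ neededB) →
      neededA ≠ [] →
      (∀ s ∈ used, ∀ ch ∈ s.toList, ch ∉ neededA) →
      alphabetOuterA (countries.map PySem.Str.lower) neededA used =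
        alphabetGreedy countries neededB used := by
  induction countries with
  | nil => intro _ _ _ _ _ _ _; rfl
  | cons c rest ih =>
    intro neededA neededB used hnd hiff hne hinv
    simp only [List.map_cons, alphabetOuterA, alphabetGreedy]
    have hnew : ∀ x, x ∈ PySem.Set.inter (PySem.Set.ofList (PySem.Str.lower c).toList) neededB ↔
        x ∈ (PySem.Str.lower c).toList ∧ x ∈ neededA := by
      intro x
      rw [PySem.Set.mem_inter, PySem.Set.mem_ofList, hiff]
    have hsets : ∀ x, x ∈ (PySem.Str.lower c).toList.foldl (fun (n : List Char) c => n.erase c) neededA ↔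
        x ∈ PySem.Set.diff neededB (PySem.Set.inter (PySem.Set.ofList (PySem.Str.lower c).toList) neededB) := by
      intro x
      rw [mem_foldl_erase _ _ hnd, PySem.Set.mem_diff, hnew, hiff]
      tauto
    by_cases hany : ∃ ch ∈ (PySem.Str.lower c).toList, ch ∈ neededA
    · -- the country contributes at least one new letter
      obtain ⟨ch, hch1, hch2⟩ := hany
      have hnotmem : PySem.Str.lower c ∉ used := fun h => hinv _ h ch hch1 hch2
      have hnewne : PySem.Set.inter (PySem.Set.ofList (PySem.Str.lower c).toList) neededB ≠ [] := by
        intro h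
        have := (hnew ch).2 ⟨hch1, hch2⟩
        rw [h] at this
        exact List.not_mem_nil this
      rw [if_pos hnewne, innerA_not_mem _ _ neededA used hne hnotmem,
          if_pos (show ∃ x ∈ (PySem.Str.lower c).toList, x ∈ neededA from ⟨ch, hch1, hch2⟩)]
      by_cases h0 : (PySem.Str.lower c).toList.foldl (fun (n : List Char) c => n.erase c) neededA = []
      · have hB0 : PySem.Set.diff neededB (PySem.Set.inter (PySem.Set.ofList (PySem.Str.lower c).toList) neededB) = [] := by
          rw [List.eq_nil_iff_forall_not_mem]
          intro x hx
          exact (List.eq_nil_iff_forall_not_mem.mp h0 x) ((hsets x).2 hx)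
        rw [if_pos h0, if_pos hB0]
      · have hB0 : PySem.Set.diff neededB (PySem.Set.inter (PySem.Set.ofList (PySem.Str.lower c).toList) neededB) ≠ [] := by
          intro h
          apply h0
          rw [List.eq_nil_iff_forall_not_mem]
          intro x hx
          exact (List.eq_nil_iff_forall_not_mem.mp h x) ((hsets x).1 hx)
        rw [if_neg h0, if_neg hB0]
        apply ih
        · exact nodup_foldl_erase _ _ hnd
        · exact hsets
        · exact h0
        · intro s hs x hx
          rw [mem_foldl_erase _ _ hnd]
          rcases List.mem_append.mp hs with hs | hs
          · exact fun h => hinv s hs x hx h.1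
          · have : s = PySem.Str.lower c := by simpa using hs
            subst this
            exact fun h => h.2 hx
    · -- no letter of the country is still needed: both sides skip it unchanged
      have hany' : ∀ ch ∈ (PySem.Str.lower c).toList, ch ∉ neededA := by
        intro ch h1 h2; exact hany ⟨ch, h1, h2⟩
      have hnew0 : PySem.Set.inter (PySem.Set.ofList (PySem.Str.lower c).toList) neededB = [] := by
        rw [List.eq_nil_iff_forall_not_mem]
        intro x hx
        obtain ⟨h1, h2⟩ := (hnew x).1 hx
        exact hany' x h1 h2
      rw [if_neg (fun h => h hnew0)]
      by_cases hmem : PySem.Str.lower c ∈ used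
      · rw [innerA_mem _ _ neededA used hne hmem, foldl_erase_of_disjoint _ _ hany', if_neg hne]
        exact ih _ _ _ hnd hiff hne hinv
      · rw [innerA_not_mem _ _ neededA used hne hmem, foldl_erase_of_disjoint _ _ hany',
            if_neg hne, if_neg hany]
        exact ih _ _ _ hnd hiff hne hinv

theorem findStopB_succ (l : List (PySem.Set Char)) :
    ∀ i, findStopB l (i + 1) = (findStopB l i).map (· + 1) := by
  induction l with
  | nil => intro i; rfl
  | cons s rest ih =>
    intro i
    simp only [findStopB]
    split_ifs with h
    · rfl
    · exact ih (i + 1)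

-- the greedy set loop = the staged passes of B
set_option maxHeartbeats 1000000 in
theorem greedy_eq_staged (countries : List String) :
    ∀ (needed cur : PySem.Set Char) (used : List String),
      (∀ x, x ∈ needed ↔ x ∈ pvAlphaList ∧ x ∉ cur) →
      needed ≠ [] →
      alphabetGreedy countries needed used =
        (match findStopB (coversB (countries.map PySem.Str.lower) cur) 0 with
         | none => none
         | some stop =>
             some (used ++ pickB ((countries.map PySem.Str.lower).take (stop + 1))
                     (cur :: coversB (countries.map PySem.Str.lower) cur))) := by
  induction countries with
  | nil => intro needed cur used _ _; rfl
  | cons c rest ih =>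
    intro needed cur used hinv hne
    simp only [List.map_cons, alphabetGreedy, coversB]
    generalize hlow : PySem.Str.lower c = low
    generalize hnewdef : PySem.Set.inter (PySem.Set.ofList low.toList) needed = new
    generalize hnxtdef : PySem.Set.union cur (PySem.Set.inter (PySem.Set.ofList low.toList) pvAlphaSet) = nxt
    have hmem_new : ∀ x, x ∈ new ↔ x ∈ low.toList ∧ x ∈ pvAlphaList ∧ x ∉ cur := by
      intro x
      rw [← hnewdef, PySem.Set.mem_inter, PySem.Set.mem_ofList, hinv x]
    have hmem_nxt : ∀ x, x ∈ nxt ↔ x ∈ cur ∨ (x ∈ low.toList ∧ x ∈ pvAlphaList) := by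
      intro x
      rw [← hnxtdef, PySem.Set.mem_union, PySem.Set.mem_inter, PySem.Set.mem_ofList,
        mem_pvAlphaSet x]
    have hinv' : ∀ x, x ∈ PySem.Set.diff needed new ↔ x ∈ pvAlphaList ∧ x ∉ nxt := by
      intro x
      rw [PySem.Set.mem_diff, hmem_new, hmem_nxt, hinv x]
      tauto
    -- the pass-2 check on nxt ↔ the new needed set is empty
    have hcheck : (pvAlphaList.all (fun ch => decide (ch ∈ nxt)) = true) ↔
        PySem.Set.diff needed new = [] := by
      rw [List.all_eq_true, List.eq_nil_iff_forall_not_mem]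
      constructor
      · intro h x hx
        obtain ⟨h1, h2⟩ := (hinv' x).1 hx
        exact h2 (of_decide_eq_true (h x h1))
      · intro h ch hch
        by_cases hc : ch ∈ nxt
        · exact decide_eq_true hc
        · exact absurd ((hinv' ch).2 ⟨hch, hc⟩) (h ch)
    by_cases hnewe : new = []
    · -- country contributes nothing: both sides skip it
      rw [if_neg (fun h => h hnewe)]
      have hdisj : ∀ x, x ∈ low.toList → x ∈ pvAlphaList → x ∈ cur := by
        intro x h1 h2
        by_contra h3
        exact (List.eq_nil_iff_forall_not_mem.mp hnewe x) ((hmem_new x).2 ⟨h1, h2, h3⟩)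
      have hinv2 : ∀ x, x ∈ needed ↔ x ∈ pvAlphaList ∧ x ∉ nxt := by
        intro x
        rw [hinv x, hmem_nxt]
        constructor
        · rintro ⟨h1, h2⟩
          refine ⟨h1, ?_⟩
          rintro (h | ⟨h3, _⟩)
          · exact h2 h
          · exact h2 (hdisj x h3 h1)
        · rintro ⟨h1, h2⟩
          exact ⟨h1, fun h => h2 (Or.inl h)⟩
      have hch_false : ¬ (pvAlphaList.all (fun ch => decide (ch ∈ nxt)) = true) := by
        intro h
        -- then needed would be empty
        apply hne
        rw [List.eq_nil_iff_forall_not_mem]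
        intro x hx
        obtain ⟨h1, h2⟩ := (hinv2 x).1 hx
        exact h2 (of_decide_eq_true (List.all_eq_true.mp h x h1))
      rw [ih needed nxt used hinv2 hne]
      simp only [findStopB, if_neg hch_false, findStopB_succ]
      cases hfs : findStopB (coversB (rest.map PySem.Str.lower) nxt) 0 with
      | none => rfl
      | some stop =>
        simp only [Option.map_some]
        have hskip : PySem.Set.diff (PySem.Set.inter (PySem.Set.ofList low.toList) pvAlphaSet) cur = [] := by
          rw [List.eq_nil_iff_forall_not_mem]
          intro x hx
          rw [PySem.Set.mem_diff, PySem.Set.mem_inter, PySem.Set.mem_ofList,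
            mem_pvAlphaSet x] at hx
          exact hx.2 (hdisj x hx.1.1 hx.1.2)
        simp only [List.take_succ_cons, pickB]
        rw [if_neg (show ¬ (PySem.Set.diff (PySem.Set.inter (PySem.Set.ofList low.toList) pvAlphaSet) cur ≠ []) from fun h => h hskip)]
    · -- country contributes a new letter
      rw [if_pos hnewe]
      have hkeep : PySem.Set.diff (PySem.Set.inter (PySem.Set.ofList low.toList) pvAlphaSet) cur ≠ [] := by
        obtain ⟨x, hx⟩ := List.exists_mem_of_ne_nil _ hnewe
        obtain ⟨h1, h2, h3⟩ := (hmem_new x).1 hx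
        intro h
        apply List.eq_nil_iff_forall_not_mem.mp h x
        rw [PySem.Set.mem_diff, PySem.Set.mem_inter, PySem.Set.mem_ofList,
          mem_pvAlphaSet x]
        exact ⟨⟨h1, h2⟩, h3⟩
      by_cases hdone : PySem.Set.diff needed new = []
      · rw [if_pos hdone]
        simp only [findStopB, if_pos (hcheck.2 hdone)]
        simp only [List.take_succ_cons, List.take_zero, pickB, if_pos hkeep]
      · rw [if_neg hdone]
        rw [ih (PySem.Set.diff needed new) nxt (used ++ [low]) hinv' hdone]
        simp only [findStopB, if_neg (fun h => hdone (hcheck.1 h)), findStopB_succ]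
        cases hfs : findStopB (coversB (rest.map PySem.Str.lower) nxt) 0 with
        | none => rfl
        | some stop =>
          simp only [Option.map_some]
          simp only [List.take_succ_cons, pickB, if_pos hkeep, List.append_assoc,
            List.singleton_append]

-- ===== VERDICT (by name: the statement is the Claim_ definition above) =====
theorem alphabet_set_spec : Claim_equal_alphabet_set := by
  intro countries _
  unfold Spec_alphabet_set alphabet_set alphabet_set_alt
  rw [show "abcdefghijklmnopqrstuvwxyz".toList = pvAlphaList from rfl]
  rw [outer_eq countries _ _ []
    (by decide)
    (fun (x : Char) => (mem_pvAlphaSet x).symm)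
    (by decide)
    (by simp),
    greedy_eq_staged countries _ ([] : PySem.Set Char) []
      (by intro x; rw [mem_pvAlphaSet x]; simp)
      (by decide)]
  simp only [List.nil_append]
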